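-- pv_equiv track=rewrite | github.com/ZijianFelixWang/ofmc | ofmc/utils.py | preprocess_nested_blockquotes
-- ===== SOURCE A (Python) =====
-- def preprocess_nested_blockquotes(markdown_text: str) -> str:
--     """
--     预处理Markdown文本，以规避texmath插件在特定嵌套块引用中的bug。
--
--     它会查找所有以 ">>" 开头的行，如果该行不是一个嵌套的callout
--     (即，不是以 ">>[!" 开头)，则会移除行首的一个 ">" 字符。
--     这能有效地将一个非callout的嵌套块引用“降级”为一级块引用，
--     从而避免触发渲染器的死循环。
--
--     Args:
--         markdown_text: 原始的Markdown文件内容。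
--
--     Returns:
--         经过预处理的Markdown文件内容。
--     """
--     lines = markdown_text.split('\n')
--     processed_lines = []
--
--     for line in lines:
--         # 核心逻辑：
--         # 1. 行是否以 ">>" 开头？
--         # 2. 如果是，它是否 *不是* 一个嵌套的 callout (">>X" 不是 ">>[!")？
--         #    我们检查剥离了前缀'>>'和可选空格后的剩余部分是否以 '[!' 开头。
--
--         stripped_line = line.lstrip()  # 处理行首的空格，增加鲁棒性
--
--         if stripped_line.startswith('>>'):
--             # 检查它是否是一个 callout
--             # ">> [!note]" -> lstrip(' >') -> "[!note]"
--             content_after_quotes = stripped_line.lstrip(' >')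
--             if not content_after_quotes.startswith('[!'):
--                 # 这就是我们要处理的目标行！
--                 # 找到第一个非空格字符的位置，然后移除它前面的一个'>'
--                 first_char_index = len(line) - len(stripped_line)
--                 quote_index = line.find('>', first_char_index)
--                 if quote_index != -1:
--                     processed_lines.append(line[:quote_index] + line[quote_index + 1:])
--                 else:  # 理论上不会发生，但作为安全措施
--                     processed_lines.append(line)
--             else:
--                 # 这是一个嵌套的callout，我们不动它
--                 processed_lines.append(line)
--         else:
--             # 这不是一个嵌套的块引用，我们不动它
--             processed_lines.append(line)
--
--     return '\n'.join(processed_lines)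
-- ===== SOURCE B (Python) =====
-- import re
--
-- # One regex pass over the whole text: each MULTILINE line that starts (after
-- # whitespace) with '>>' is handed to a callback that drops one '>' unless the
-- # line is a nested callout ('[!' after stripping spaces and '>'s).
-- _NESTED = re.compile(r'^([ \t\v\f\r]*)(>>[^\n]*)', re.MULTILINE)
--
-- def _demote(m):
--     body = m.group(2)
--     if body.lstrip(' >').startswith('[!'):
--         return m.group(0)          # nested callout: leave untouched
--     return m.group(1) + body[1:]   # remove one '>' after the leading whitespace
--
-- def preprocess_nested_blockquotes(markdown_text: str) -> str:
--     return _NESTED.sub(_demote, markdown_text)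
-- ===== Notes on version B (the rewrite author's own statement) =====
-- stated objective: idiomatic
-- what changed: B replaces A's split-into-lines loop of per-line str methods (lstrip, startswith, find, slice-splice, join) with a single re.sub pass over the whole text using a MULTILINE-anchored pattern and a callback that keeps callouts and drops one '>' otherwise.
import Mathlib
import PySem

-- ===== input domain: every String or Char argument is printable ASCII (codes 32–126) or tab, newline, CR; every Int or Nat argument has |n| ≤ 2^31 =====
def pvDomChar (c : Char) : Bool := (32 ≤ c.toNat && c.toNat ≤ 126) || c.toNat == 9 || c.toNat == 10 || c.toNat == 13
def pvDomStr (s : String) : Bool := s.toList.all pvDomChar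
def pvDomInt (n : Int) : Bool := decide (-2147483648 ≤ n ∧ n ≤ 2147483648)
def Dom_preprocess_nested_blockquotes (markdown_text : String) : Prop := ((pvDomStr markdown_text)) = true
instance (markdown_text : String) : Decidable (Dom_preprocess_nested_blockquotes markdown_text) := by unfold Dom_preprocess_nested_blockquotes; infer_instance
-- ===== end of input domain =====

-- B replaces A's split-into-lines loop of per-line str methods (lstrip, startswith,
-- find, slice-splice, join) by a single regex substitution pass (re.sub with a
-- MULTILINE-anchored pattern and a callback); idiomatic, same cost.


-- ===== PORT A =====
-- one loop body of A: process a single line (lines contain no '\n')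
def pvAline (line : List Char) : List Char :=
  let stripped := PySem.Chars.lstrip line                       -- line.lstrip()
  if PySem.Chars.startswith stripped ['>', '>'] then
    -- stripped_line.lstrip(' >'): hand port (exact: str.lstrip(chars) drops leading chars of the set)
    let content_after_quotes := stripped.dropWhile (fun c => c == ' ' || c == '>')
    if !(PySem.Chars.startswith content_after_quotes ['[', '!']) then
      let first_char_index : Int := (line.length : Int) - (stripped.length : Int)
      let quote_index := PySem.Chars.findFrom line ['>'] first_char_index   -- line.find('>', i)
      if quote_index ≠ -1 then
        PySem.List.slice line none (some quote_index) ++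
          PySem.List.slice line (some (quote_index + 1)) none   -- line[:q] + line[q+1:]
      else line
    else line
  else line

def preprocess_nested_blockquotes (markdown_text : String) : String :=
  let lines := PySem.Chars.splitOn markdown_text.toList ['\n']  -- markdown_text.split('\n')
  let processed_lines := lines.foldl (fun acc line => acc ++ [pvAline line]) []
  String.ofList (PySem.Chars.join ['\n'] processed_lines)           -- '\n'.join(processed_lines)

-- ===== PORT B =====
-- The regex class [ \t\v\f\r] of the pattern
def pvWsClass (c : Char) : Bool := c == ' ' || c == '\t' || c == '\x0b' || c == '\x0c' || c == '\r'

-- the callback _demote, given the two captured groups (group(0) = g1 ++ g2)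
def pvCallback (g1 g2 : List Char) : List Char :=
  if PySem.Chars.startswith (g2.dropWhile (fun c => c == ' ' || c == '>')) ['[', '!'] then
    g1 ++ g2                 -- nested callout: return m.group(0) unchanged
  else
    g1 ++ g2.drop 1          -- m.group(1) + body[1:]

-- Hand port of the anchored attempt of r'^([ \t\v\f\r]*)(>>[^\n]*)' at a line start
-- (exact for this fixed pattern: the class excludes '\n' and cannot backtrack
-- before the literal '>>', and '[^\n]*' greedily consumes to the line end).
def pvTryMatch (cs : List Char) : Option (List Char × List Char) :=
  let g1 := cs.takeWhile pvWsClass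
  let r := cs.dropWhile pvWsClass
  if r.take 2 = ['>', '>'] then some (g1, r.takeWhile (fun c => c != '\n')) else none

-- what the sub engine emits for the current line start: the callback's replacement,
-- or (no match: with MULTILINE '^' no later position of this line can match) the
-- line copied verbatim
def pvEmit (cs : List Char) : List Char :=
  match pvTryMatch cs with
  | some (g1, g2) => pvCallback g1 g2
  | none => cs.takeWhile (fun c => c != '\n')

-- Hand port of _NESTED.sub(_demote, text): process one line start per step,
-- copy the '\n' separator, continue at the next line start.
def pvSubGo (cs : List Char) : List Char :=
  match _h : cs.dropWhile (fun c => c != '\n') with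
  | [] => pvEmit cs
  | _ :: rs => pvEmit cs ++ '\n' :: pvSubGo rs
termination_by cs.length
decreasing_by
  have hle := List.length_dropWhile_le (fun c => c != '\n') cs
  rw [_h] at hle
  simp only [List.length_cons] at hle
  omega

def preprocess_nested_blockquotes_alt (markdown_text : String) : String :=
  String.ofList (pvSubGo markdown_text.toList)

-- ===== PRECONDITION & SPEC =====
def Spec_preprocess_nested_blockquotes (markdown_text : String) (out : String) : Prop := out = preprocess_nested_blockquotes_alt markdown_text
instance (markdown_text : String) (out : String) : Decidable (Spec_preprocess_nested_blockquotes markdown_text out) := by unfold Spec_preprocess_nested_blockquotes; infer_instance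

-- ===== CLAIM (what is proved, stated in full; the proofs are below) =====
def Claim_equal_preprocess_nested_blockquotes : Prop := ∀ (markdown_text : String), Dom_preprocess_nested_blockquotes markdown_text → Spec_preprocess_nested_blockquotes markdown_text (preprocess_nested_blockquotes markdown_text)

-- ===== LEMMAS AND PROOFS =====

-- A's line decomposition, as a function: the list of '\n'-separated pieces
def pvSplit (cs : List Char) : List (List Char) :=
  match _h : cs.dropWhile (fun c => c != '\n') with
  | [] => [cs]
  | _ :: rs => cs.takeWhile (fun c => c != '\n') :: pvSplit rs
termination_by cs.length
decreasing_by
  have hle := List.length_dropWhile_le (fun c => c != '\n') cs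
  rw [_h] at hle
  simp only [List.length_cons] at hle
  omega

def pvConsHead (p : List Char) : List (List Char) → List (List Char)
  | [] => [p]
  | x :: xs => (p ++ x) :: xs

lemma pvCharEqIff (c d : Char) : (c == d) = decide (c.toNat = d.toNat) := by
  by_cases h : c = d
  · subst h; simp
  · have hn : c.toNat ≠ d.toNat := fun hh => h (Char.ext (UInt32.toNat_inj.mp hh))
    simp [h, hn]

lemma pvSplit_ne_nil (cs : List Char) : pvSplit cs ≠ [] := by
  unfold pvSplit
  split <;> simp

lemma pvSplit_of_nil (cs : List Char) (h : cs.dropWhile (fun c => c != '\n') = []) :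
    pvSplit cs = [cs] := by
  unfold pvSplit
  split
  · rfl
  · simp_all

lemma pvSplit_of_cons (cs : List Char) (y : Char) (rs : List Char)
    (h : cs.dropWhile (fun c => c != '\n') = y :: rs) :
    pvSplit cs = cs.takeWhile (fun c => c != '\n') :: pvSplit rs := by
  unfold pvSplit
  split
  · simp_all
  · rename_i h2
    rw [h] at h2
    cases h2
    conv_lhs => rw [pvSplit]

-- splitOn.go with separator ['\n'] computes pvSplit
lemma pvSplitOn_go_eq (fuel : Nat) (cs cur : List Char) (acc : List (List Char))
    (hf : cs.length < fuel) :
    PySem.Chars.splitOn.go ['\n'] fuel cs cur acc =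
      acc.reverse ++ pvConsHead cur.reverse (pvSplit cs) := by
  induction fuel generalizing cs cur acc with
  | zero => omega
  | succ f ih =>
    rw [PySem.Chars.splitOn.go.eq_def]
    cases cs with
    | nil =>
      simp only []
      rw [pvSplit]
      simp [pvConsHead]
    | cons c rest =>
      simp only []
      by_cases hc : c = '\n'
      · subst hc
        have hpre : ['\n'].isPrefixOf ('\n' :: rest) = true := by simp [List.isPrefixOf]
        rw [if_pos hpre]
        rw [ih _ _ _ (by simp at hf ⊢; omega)]
        have hdrop : ('\n' :: rest).dropWhile (fun c => c != '\n') = '\n' :: rest := by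
          simp
        rw [pvSplit_of_cons _ _ _ hdrop]
        obtain ⟨x, xs, hx⟩ : ∃ x xs, pvSplit rest = x :: xs := by
          cases hps : pvSplit rest with
          | nil => exact absurd hps (pvSplit_ne_nil rest)
          | cons x xs => exact ⟨x, xs, rfl⟩
        simp [hx, pvConsHead]
      · have hpre : ['\n'].isPrefixOf (c :: rest) = false := by
          simp only [List.isPrefixOf, Bool.and_true, beq_eq_false_iff_ne, ne_eq]
          exact fun h => hc h.symm
        rw [if_neg (by simp [hpre])]
        rw [ih _ _ _ (by simp at hf ⊢; omega)]
        have hdrop : (c :: rest).dropWhile (fun c => c != '\n') =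
            rest.dropWhile (fun c => c != '\n') := by
          simp [hc]
        cases h2 : rest.dropWhile (fun c => c != '\n') with
        | nil =>
          rw [pvSplit_of_nil rest h2, pvSplit_of_nil (c :: rest) (by rw [hdrop, h2])]
          have htk : rest.takeWhile (fun c => c != '\n') = rest := by
            have hh := List.takeWhile_append_dropWhile (p := fun c => c != '\n') (l := rest)
            rw [h2, List.append_nil] at hh
            exact hh
          simp [pvConsHead]
        | cons y rs =>
          rw [pvSplit_of_cons rest y rs h2, pvSplit_of_cons (c :: rest) y rs (by rw [hdrop, h2])]
          simp [pvConsHead, hc]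

lemma pvSplitOn_eq (cs : List Char) :
    PySem.Chars.splitOn cs ['\n'] = pvSplit cs := by
  unfold PySem.Chars.splitOn
  rw [pvSplitOn_go_eq _ _ _ _ (by omega)]
  obtain ⟨x, xs, hx⟩ : ∃ x xs, pvSplit cs = x :: xs := by
    cases hps : pvSplit cs with
    | nil => exact absurd hps (pvSplit_ne_nil cs)
    | cons x xs => exact ⟨x, xs, rfl⟩
  simp [hx, pvConsHead]

-- whitespace test agreement on the domain, off '\n'
lemma pvWs_eq (c : Char) (hd : pvDomChar c = true) (hne : c ≠ '\n') :
    PySem.Chars.isspace c = pvWsClass c := by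
  have h10 : c.toNat ≠ 10 := fun hh => hne (Char.ext (UInt32.toNat_inj.mp hh))
  have hda := hd
  simp only [pvDomChar, Bool.or_eq_true, Bool.and_eq_true, decide_eq_true_eq, beq_iff_eq] at hda
  simp only [PySem.Chars.isspace, pvWsClass, pvCharEqIff]
  refine Bool.eq_iff_iff.mpr ?_
  simp only [Bool.or_eq_true, Bool.and_eq_true, decide_eq_true_eq]
  have e1 : (' ').toNat = 32 := rfl
  have e2 : ('\t').toNat = 9 := rfl
  have e3 : ('\r').toNat = 13 := rfl
  have e4 : ('\x0b').toNat = 11 := rfl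
  have e5 : ('\x0c').toNat = 12 := rfl
  rw [e1, e2, e3, e4, e5]
  omega

lemma pvDropWhile_congr {p q : Char → Bool} (l : List Char) (h : ∀ x ∈ l, p x = q x) :
    l.dropWhile p = l.dropWhile q := by
  induction l with
  | nil => rfl
  | cons a t ih =>
    simp only [List.dropWhile_cons]
    rw [h a (by simp)]
    split
    · exact ih fun x hx => h x (by simp [hx])
    · rfl

lemma pvTakeLen (p : Char → Bool) (l : List Char) :
    l.take (l.takeWhile p).length = l.takeWhile p := by
  induction l with
  | nil => simp
  | cons a t ih =>
    by_cases h : p a = true <;> simp [List.takeWhile_cons, h, ih]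

lemma pvDropLen (p : Char → Bool) (l : List Char) :
    l.drop (l.takeWhile p).length = l.dropWhile p := by
  induction l with
  | nil => simp
  | cons a t ih =>
    by_cases h : p a = true <;> simp [List.takeWhile_cons, List.dropWhile_cons, h, ih]

-- per line (no '\n' in it): the engine's emission is A's processing of that line
lemma pvLine_eq (line : List Char) (hd : ∀ c ∈ line, pvDomChar c = true)
    (hn : '\n' ∉ line) : pvEmit line = pvAline line := by
  have hdw : line.dropWhile PySem.Chars.isspace = line.dropWhile pvWsClass :=
    pvDropWhile_congr line (fun x hx => pvWs_eq x (hd x hx) (fun he => hn (he ▸ hx)))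
  have hlstrip : PySem.Chars.lstrip line = line.dropWhile pvWsClass := by
    rw [PySem.Chars.lstrip]; exact hdw
  have hline_take : line.takeWhile (fun c => c != '\n') = line := by
    rw [List.takeWhile_eq_self_iff]
    intro c hc
    rw [bne_iff_ne]
    intro he
    exact hn (he ▸ hc)
  have hsplit : line.takeWhile pvWsClass ++ line.dropWhile pvWsClass = line :=
    List.takeWhile_append_dropWhile
  have hrest_take : (line.dropWhile pvWsClass).takeWhile (fun c => c != '\n')
      = line.dropWhile pvWsClass := by
    rw [List.takeWhile_eq_self_iff]
    intro c hc
    have hcl : c ∈ line := by rw [← hsplit]; exact List.mem_append_right _ hc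
    rw [bne_iff_ne]
    intro he
    exact hn (he ▸ hcl)
  have hsw : ∀ (s : List Char) (c₁ c₂ : Char),
      PySem.Chars.startswith s [c₁, c₂] = decide (s.take 2 = [c₁, c₂]) := by
    intro s c₁ c₂
    refine Bool.eq_iff_iff.mpr ?_
    rw [PySem.Chars.startswith_iff, List.prefix_iff_eq_take]
    simp [eq_comm]
  by_cases h1 : (line.dropWhile pvWsClass).take 2 = ['>', '>']
  · -- the pattern matches: the engine calls the callback
    have htm : pvTryMatch line
        = some (line.takeWhile pvWsClass, line.dropWhile pvWsClass) := by
      simp only [pvTryMatch]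
      rw [if_pos h1, hrest_take]
    rw [show pvEmit line = pvCallback (line.takeWhile pvWsClass) (line.dropWhile pvWsClass) by
      simp only [pvEmit, htm]]
    simp only [pvAline, pvCallback]
    rw [hlstrip]
    rw [show PySem.Chars.startswith (line.dropWhile pvWsClass) ['>', '>'] = true by
      rw [hsw]; simpa using h1]
    rw [if_pos rfl]
    by_cases h2 : PySem.Chars.startswith
        ((line.dropWhile pvWsClass).dropWhile fun c => c == ' ' || c == '>') ['[', '!'] = true
    · rw [if_pos h2]
      rw [show (!PySem.Chars.startswith
          ((line.dropWhile pvWsClass).dropWhile fun c => c == ' ' || c == '>')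
          ['[', '!']) = false by simp [h2]]
      rw [if_neg (by simp)]
      exact hsplit
    · rw [if_neg h2]
      rw [show (!PySem.Chars.startswith
          ((line.dropWhile pvWsClass).dropWhile fun c => c == ' ' || c == '>')
          ['[', '!']) = true by simpa using h2]
      rw [if_pos rfl]
      -- A's index arithmetic: first_char_index is the length of the whitespace prefix
      have hlen : line.length
          = (line.takeWhile pvWsClass).length + (line.dropWhile pvWsClass).length := by
        conv_lhs => rw [← hsplit]
        exact List.length_append
      have hidx : (line.length : Int) - ((line.dropWhile pvWsClass).length : Int)
          = ((line.takeWhile pvWsClass).length : Int) := by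
        rw [hlen]; push_cast; ring
      rw [hidx]
      have hk : (line.takeWhile pvWsClass).length ≤ line.length := by omega
      have hdropk : line.drop (line.takeWhile pvWsClass).length = line.dropWhile pvWsClass :=
        pvDropLen pvWsClass line
      have hrsh : line.dropWhile pvWsClass
          = '>' :: '>' :: (line.dropWhile pvWsClass).drop 2 := by
        conv_lhs => rw [← List.take_append_drop 2 (line.dropWhile pvWsClass), h1]
        rfl
      have hfind0 : PySem.Chars.find (line.dropWhile pvWsClass) ['>'] = 0 := by
        have hpre : ['>'] <+: line.dropWhile pvWsClass := by
          rw [hrsh]; simp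
        have hnn : 0 ≤ PySem.Chars.find (line.dropWhile pvWsClass) ['>'] :=
          (PySem.Chars.find_nonneg_iff _ _).mpr hpre.isInfix
        have hspec := PySem.Chars.find_spec hnn
        by_contra hne0
        have hpos : 0 < (PySem.Chars.find (line.dropWhile pvWsClass) ['>']).toNat := by omega
        exact hspec.2 0 hpos (by simpa using hpre)
      have hff : PySem.Chars.findFrom line ['>'] (((line.takeWhile pvWsClass).length : Int))
          = (((line.takeWhile pvWsClass).length : Int)) := by
        rw [PySem.Chars.findFrom_natCast line ['>'] _ hk, hdropk, hfind0]
        simp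
      rw [hff, if_pos (show (((line.takeWhile pvWsClass).length : Int)) ≠ -1 by omega)]
      have hsl1 : PySem.List.slice line none (some (((line.takeWhile pvWsClass).length : Int)))
          = line.takeWhile pvWsClass := by
        rw [PySem.List.slice_to_natCast]
        exact pvTakeLen pvWsClass line
      have hsl2 : PySem.List.slice line (some ((((line.takeWhile pvWsClass).length : Int)) + 1))
          none = (line.dropWhile pvWsClass).drop 1 := by
        have hc : (((line.takeWhile pvWsClass).length : Int)) + 1
            = (((line.takeWhile pvWsClass).length + 1 : Nat) : Int) := by push_cast; ring
        rw [hc, PySem.List.slice_from_natCast]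
        rw [← List.drop_drop, hdropk]
      rw [hsl1, hsl2]
  · -- no match: the engine copies the line verbatim
    have htm : pvTryMatch line = none := by
      simp only [pvTryMatch]
      rw [if_neg h1]
    rw [show pvEmit line = line.takeWhile (fun c => c != '\n') by simp only [pvEmit, htm]]
    simp only [pvAline]
    rw [hlstrip]
    rw [show PySem.Chars.startswith (line.dropWhile pvWsClass) ['>', '>'] = false by
      rw [hsw]; simpa using h1]
    rw [if_neg (by simp), hline_take]

-- the engine's emission only looks at the first line of the remaining text
lemma pvTakeWhile_sub (cs : List Char) :
    cs.takeWhile pvWsClass = (cs.takeWhile (fun c => c != '\n')).takeWhile pvWsClass ∧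
    (cs.takeWhile (fun c => c != '\n')).dropWhile pvWsClass =
      (cs.dropWhile pvWsClass).takeWhile (fun c => c != '\n') := by
  induction cs with
  | nil => simp
  | cons a t ih =>
    by_cases hn : a = '\n'
    · subst hn
      have hw : pvWsClass '\n' = false := by decide
      simp [hw]
    · have hne : (a != '\n') = true := by simpa using hn
      by_cases hw : pvWsClass a = true
      · simp [hne, hw, ih.1, ih.2]
      · simp [hne, hw]

lemma pvTake2_takeWhile (l : List Char) :
    ((l.takeWhile (fun c => c != '\n')).take 2 = ['>', '>']) ↔ (l.take 2 = ['>', '>']) := by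
  match l with
  | [] => simp
  | [a] => by_cases h : (a != '\n') = true <;> simp [h]
  | a :: b :: t =>
    by_cases ha : (a != '\n') = true
    · by_cases hb : (b != '\n') = true
      · simp [ha, hb]
      · have hb' : b = '\n' := by simpa using hb
        subst hb'
        constructor
        · intro h
          simp [ha] at h
        · intro h
          simp at h
    · have ha' : a = '\n' := by simpa using ha
      subst ha'
      constructor
      · intro h
        simp at h
      · intro h
        simp at h

lemma pvEmit_firstLine (cs : List Char) :
    pvEmit cs = pvEmit (cs.takeWhile (fun c => c != '\n')) := by
  obtain ⟨h1, h2⟩ := pvTakeWhile_sub cs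
  simp only [pvEmit, pvTryMatch]
  rw [← h1, ← h2]
  by_cases hm : (cs.dropWhile pvWsClass).take 2 = ['>', '>']
  · rw [if_pos hm, if_pos (by rw [h2]; exact (pvTake2_takeWhile _).mpr hm)]
    rw [h2, List.takeWhile_idem]
  · rw [if_neg hm, if_neg (by rw [h2]; exact fun h => hm ((pvTake2_takeWhile _).mp h))]
    rw [List.takeWhile_idem]

-- pvSubGo's two defining equations
lemma pvSubGo_of_nil (cs : List Char) (h : cs.dropWhile (fun c => c != '\n') = []) :
    pvSubGo cs = pvEmit cs := by
  unfold pvSubGo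
  split
  · rfl
  · simp_all

lemma pvSubGo_of_cons (cs : List Char) (y : Char) (rs : List Char)
    (h : cs.dropWhile (fun c => c != '\n') = y :: rs) :
    pvSubGo cs = pvEmit cs ++ '\n' :: pvSubGo rs := by
  unfold pvSubGo
  split
  · simp_all
  · rename_i h2
    rw [h] at h2
    cases h2
    conv_lhs => rw [pvSubGo]

-- the whole text
lemma pvMain (cs : List Char) : (∀ c ∈ cs, pvDomChar c = true) →
    PySem.Chars.join ['\n'] ((pvSplit cs).map pvAline) = pvSubGo cs := by
  induction cs using pvSplit.induct with
  | case1 cs h =>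
    intro hd
    rw [pvSplit_of_nil cs h, pvSubGo_of_nil cs h]
    rw [List.map_singleton, PySem.Chars.join_singleton]
    have hnn : '\n' ∉ cs := by
      intro hmem
      have := List.dropWhile_eq_nil_iff.mp h '\n' hmem
      simp at this
    rw [← pvLine_eq cs hd hnn]
  | case2 cs y rs h ih =>
    intro hd
    rw [pvSplit_of_cons cs y rs h, pvSubGo_of_cons cs y rs h]
    have hsubrs : ∀ c ∈ rs, pvDomChar c = true := by
      intro c hc
      exact hd c ((List.dropWhile_sublist _).subset (h ▸ List.mem_cons_of_mem y hc))
    have hline : pvAline (cs.takeWhile (fun c => c != '\n')) = pvEmit cs := by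
      rw [pvEmit_firstLine]
      refine (pvLine_eq _ (fun c hc => hd c ((List.takeWhile_sublist _).subset hc)) ?_).symm
      intro hmem
      have := List.mem_takeWhile_imp hmem
      simp at this
    obtain ⟨x, xs, hx⟩ : ∃ x xs, pvSplit rs = x :: xs := by
      cases hps : pvSplit rs with
      | nil => exact absurd hps (pvSplit_ne_nil rs)
      | cons x xs => exact ⟨x, xs, rfl⟩
    rw [List.map_cons, hx, List.map_cons, PySem.Chars.join_cons_cons, ← List.map_cons, ← hx,
      ih hsubrs, hline]
    simp

-- ===== VERDICT (by name: the statement is the Claim_ definition above) =====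
theorem preprocess_nested_blockquotes_spec : Claim_equal_preprocess_nested_blockquotes := by
  intro s hdom
  unfold Spec_preprocess_nested_blockquotes
  unfold preprocess_nested_blockquotes preprocess_nested_blockquotes_alt
  simp only [pvSplitOn_eq, PySem.List.foldl_append_singleton_eq_map, List.nil_append]
  have hd : ∀ c ∈ s.toList, pvDomChar c = true := by
    have := hdom
    unfold Dom_preprocess_nested_blockquotes pvDomStr at this
    simpa [List.all_eq_true] using this
  rw [pvMain s.toList hd]
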